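-- pv_equiv track=rewrite | github.com/artur-masalcev/BachelorsThesis | NTRUEncrypt/plaintext_to_ternary_conversion_utils.py | string_to_ternary
-- ===== SOURCE A (Python) =====
-- def decimal_to_ternary(n):
--     """Convert a decimal number to ternary (base 3), returning as a list of digits."""
--     if n == 0:
--         return [0]
--     digits = []
--     while n:
--         digits.append(n % 3)
--         n //= 3
--     return digits[::-1]
--
-- def string_to_ternary(s, N):
--     """Convert a string to a ternary code, using ASCII values."""
--     s += chr(3)
--     ternary_array = []
--     for char in s:
--         ascii_val = ord(char)
--         ternary_digits = decimal_to_ternary(ascii_val)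
--         # Prefix with necessary zeros to ensure fixed length for each character
--         ternary_digits = [0] * (5 - len(ternary_digits)) + ternary_digits
--         ternary_array.extend(ternary_digits)
--
--     for i in range(N - (len(s) * 5)):
--         ternary_array.append(0)
--
--     return ternary_array
-- ===== SOURCE B (Python) =====
-- def string_to_ternary(s, N):
--     """Convert a string to a ternary code, using ASCII values (MSB-first per character)."""
--     out = []
--     for char in s + chr(3):
--         val = ord(char)
--         k, x = 0, val
--         while x:
--             k += 1
--             x //= 3
--         width = max(5, k)
--         out.extend((val // 3 ** i) % 3 for i in range(width - 1, -1, -1))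
--     if N > len(out):
--         out.extend([0] * (N - len(out)))
--     return out
-- ===== Notes on version B (the rewrite author's own statement) =====
-- stated objective: alternative
-- what changed: Each character is converted MSB-first by direct power division (val // 3**i) % 3 over a width computed from the ternary digit count, replacing A's LSB remainder loop + list reversal + zero-prefix concatenation; the final padding is length-based instead of re-deriving the count from len(s)*5.
import Mathlib
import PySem

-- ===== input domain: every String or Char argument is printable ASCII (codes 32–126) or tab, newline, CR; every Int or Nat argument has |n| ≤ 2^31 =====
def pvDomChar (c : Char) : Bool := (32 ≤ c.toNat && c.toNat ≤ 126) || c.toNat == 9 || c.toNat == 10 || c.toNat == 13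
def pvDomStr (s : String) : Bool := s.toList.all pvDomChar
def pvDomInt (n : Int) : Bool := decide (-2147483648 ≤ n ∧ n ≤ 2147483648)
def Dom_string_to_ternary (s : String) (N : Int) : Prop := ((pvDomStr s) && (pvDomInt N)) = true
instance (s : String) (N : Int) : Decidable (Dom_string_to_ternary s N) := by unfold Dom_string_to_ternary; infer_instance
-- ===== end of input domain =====

-- B converts each character MSB-first by power division (width computed from the digit count)
-- instead of A's LSB remainder loop + reverse + zero-prefix; same return value on the domain ('alternative').

-- ===== PORT A =====
-- while n: digits.append(n % 3); n //= 3   (exact for the nonnegative ord values it is called on)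
def pvD2TgoF (fuel n : Nat) (digits : List Int) : List Int :=
  match fuel with
  | 0 => digits
  | fuel + 1 => if n = 0 then digits else pvD2TgoF fuel (n / 3) (digits ++ [((n % 3 : Nat) : Int)])

-- fuel n suffices: n // 3 < n whenever n > 0
def pvD2Tgo (n : Nat) (digits : List Int) : List Int := pvD2TgoF n n digits

def decimal_to_ternary (n : Nat) : List Int :=
  if n = 0 then [0] else (pvD2Tgo n []).reverse

def string_to_ternary (s : String) (N : Int) : List Int :=
  -- s += chr(3)
  let t := s.toList ++ ['\x03']
  let arr := t.foldl (fun arr c =>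
    let td := decimal_to_ternary c.toNat
    -- [0] * (5 - len(td)) + td   (Nat subtraction clamps at 0, as Python's empty repeat)
    arr ++ (List.replicate (5 - td.length) (0 : Int) ++ td)) []
  -- for i in range(N - len(s)*5): append 0
  arr ++ List.replicate (N - (t.length : Int) * 5).toNat (0 : Int)

-- ===== PORT B =====
-- k, x = 0, val; while x: k += 1; x //= 3
def pvNDigitsF (fuel x : Nat) : Nat :=
  match fuel with
  | 0 => 0
  | fuel + 1 => if x = 0 then 0 else pvNDigitsF fuel (x / 3) + 1

-- fuel x suffices: x // 3 < x whenever x > 0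
def pvNDigits (x : Nat) : Nat := pvNDigitsF x x

def string_to_ternary_alt (s : String) (N : Int) : List Int :=
  let out := (s.toList ++ ['\x03']).foldl (fun out c =>
    let val := c.toNat
    let width := max 5 (pvNDigits val)
    -- (val // 3**i) % 3 for i in range(width-1, -1, -1): (List.range width).reverse = [width-1, …, 0]
    out ++ (List.range width).reverse.map (fun i => ((val / 3 ^ i % 3 : Nat) : Int))) []
  if N > (out.length : Int) then out ++ List.replicate (N - (out.length : Int)).toNat (0 : Int) else out

-- ===== PRECONDITION & SPEC =====
def Spec_string_to_ternary (s : String) (N : Int) (out : List Int) : Prop := out = string_to_ternary_alt s N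
instance (s : String) (N : Int) (out : List Int) : Decidable (Spec_string_to_ternary s N out) := by unfold Spec_string_to_ternary; infer_instance

-- ===== CLAIM (what is proved, stated in full; the proofs are below) =====
def Claim_equal_string_to_ternary : Prop := ∀ (s : String) (N : Int), Dom_string_to_ternary s N → Spec_string_to_ternary s N (string_to_ternary s N)

-- ===== LEMMAS AND PROOFS =====

def pvBlockA (v : Nat) : List Int :=
  List.replicate (5 - (decimal_to_ternary v).length) (0 : Int) ++ decimal_to_ternary v

def pvBlockB (v : Nat) : List Int :=
  (List.range (max 5 (pvNDigits v))).reverse.map (fun i => ((v / 3 ^ i % 3 : Nat) : Int))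

-- per-character agreement and fixed width on the domain's codes
set_option maxRecDepth 8192 in
lemma pvBlock_eq : ∀ v < 243, pvBlockA v = pvBlockB v ∧ (pvBlockA v).length = 5 := by decide

lemma pvFoldA (l : List Char) (acc : List Int) :
    l.foldl (fun arr c =>
      let td := decimal_to_ternary c.toNat
      arr ++ (List.replicate (5 - td.length) (0 : Int) ++ td)) acc
      = acc ++ l.flatMap (fun c => pvBlockA c.toNat) := by
  induction l generalizing acc with
  | nil => simp
  | cons c l ih => simp [ih, pvBlockA]

lemma pvFoldB (l : List Char) (acc : List Int) :
    l.foldl (fun out c =>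
      let val := c.toNat
      let width := max 5 (pvNDigits val)
      out ++ (List.range width).reverse.map (fun i => ((val / 3 ^ i % 3 : Nat) : Int))) acc
      = acc ++ l.flatMap (fun c => pvBlockB c.toNat) := by
  induction l generalizing acc with
  | nil => simp
  | cons c l ih => rw [List.foldl_cons, ih]; simp [pvBlockB]

lemma pvFlat_eq (l : List Char) (h : ∀ c ∈ l, c.toNat < 243) :
    l.flatMap (fun c => pvBlockA c.toNat) = l.flatMap (fun c => pvBlockB c.toNat)
    ∧ (l.flatMap (fun c => pvBlockA c.toNat)).length = 5 * l.length := by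
  induction l with
  | nil => simp
  | cons c l ih =>
    have hc := pvBlock_eq c.toNat (h c (by simp))
    have ih' := ih (fun d hd => h d (by simp [hd]))
    refine ⟨by simp [List.flatMap_cons, hc.1, ih'.1], ?_⟩
    simp only [List.flatMap_cons, List.length_append, hc.2, ih'.2, List.length_cons]
    ring

theorem string_to_ternary_spec' (s : String) (N : Int) (h : Dom_string_to_ternary s N) :
    string_to_ternary s N = string_to_ternary_alt s N := by
  unfold Dom_string_to_ternary pvDomStr at h
  simp only [Bool.and_eq_true, List.all_eq_true] at h
  have hchars : ∀ c ∈ s.toList ++ ['\x03'], c.toNat < 243 := by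
    intro c hc
    rcases List.mem_append.mp hc with hc | hc
    · have := h.1 c hc
      unfold pvDomChar at this
      simp only [Bool.or_eq_true, Bool.and_eq_true, decide_eq_true_eq, beq_iff_eq] at this
      omega
    · simp at hc; subst hc; decide
  obtain ⟨heq, hlen⟩ := pvFlat_eq (s.toList ++ ['\x03']) hchars
  simp only [string_to_ternary, string_to_ternary_alt, pvFoldA, pvFoldB, List.nil_append]
  rw [← heq]
  set arr := (s.toList ++ ['\x03']).flatMap (fun c => pvBlockA c.toNat) with harr
  have hL : (arr.length : Int) = ((s.toList ++ ['\x03']).length : Int) * 5 := by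
    rw [hlen]; push_cast; ring
  rw [hL]
  set L : Int := ((s.toList ++ ['\x03']).length : Int) * 5
  by_cases hN : N > L
  · simp [hN]
  · simp only [hN, if_false]
    have : (N - L).toNat = 0 := by omega
    simp [this]

-- ===== VERDICT (by name: the statement is the Claim_ definition above) =====
theorem string_to_ternary_spec : Claim_equal_string_to_ternary := by
  intro s N h
  exact string_to_ternary_spec' s N h
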